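-- pv_equiv track=rewrite | github.com/aizigao/keepTraining | algorithm/oi-wiki/basic/simulate/demo.py | clampUp
-- ===== SOURCE A (Python) =====
-- def clampUp(n, u, d):
--     time = 0
--     dist = 0
--
--     # 死循环模拟枚举
--     while True:
--         dist += u
--         time += 1
--
--         if dist >= n:
--             break
--         dist -= d
--         time += 1
--     return time
-- ===== SOURCE B (Python) =====
-- def clampUp(n, u, d):
--     # Closed form: first climb reaches n iff n <= u; otherwise each full
--     # up-down cycle gains u - d, so we need ceil((n - u) / (u - d)) cycles
--     # (2 time units each) before the final climb (1 time unit).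
--     if n <= u:
--         return 1
--     return 2 * (-((u - n) // (u - d))) + 1
-- ===== Notes on version B (the rewrite author's own statement) =====
-- stated objective: simpler
-- what changed: Replaced the step-by-step up/down simulation loop with a closed-form ceiling-division formula: time = 2*ceil((n-u)/(u-d)) + 1 when n > u, else 1.
import Mathlib
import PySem

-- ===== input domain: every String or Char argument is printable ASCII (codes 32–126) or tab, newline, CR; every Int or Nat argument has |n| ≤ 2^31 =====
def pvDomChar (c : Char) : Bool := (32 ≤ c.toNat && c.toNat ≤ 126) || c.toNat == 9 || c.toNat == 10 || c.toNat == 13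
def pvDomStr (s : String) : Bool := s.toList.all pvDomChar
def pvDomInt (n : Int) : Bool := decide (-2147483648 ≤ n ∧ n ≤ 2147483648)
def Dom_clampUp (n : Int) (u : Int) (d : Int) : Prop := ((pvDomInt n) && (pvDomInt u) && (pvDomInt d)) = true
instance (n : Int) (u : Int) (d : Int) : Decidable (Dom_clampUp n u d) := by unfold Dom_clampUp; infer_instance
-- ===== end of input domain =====

-- B replaces A's step-by-step simulation loop with a closed-form ceiling-division formula (simpler).

-- ===== PORT A =====
-- A's `while True` loop, step for step: dist += u; time += 1; break if dist >= n;
-- dist -= d; time += 1; repeat.  The `u ≤ d` branch is only a totality guard for the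
-- inputs on which Python A loops forever (those are excluded by Pre_clampUp).
def clampUpLoop (n : Int) (u : Int) (d : Int) (dist : Int) (time : Int) : Int :=
  if n ≤ dist + u then time + 1
  else if h : u ≤ d then time + 1
  else clampUpLoop n u d (dist + u - d) (time + 2)
termination_by (n - dist - u).toNat
decreasing_by omega

def clampUp (n : Int) (u : Int) (d : Int) : Int := clampUpLoop n u d 0 0

-- ===== PORT B =====
def clampUp_alt (n : Int) (u : Int) (d : Int) : Int :=
  if n ≤ u then 1
  else 2 * (-(PySem.Int.floordiv (u - n) (u - d))) + 1

-- ===== PRECONDITION & SPEC =====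
-- Pre_ excludes exactly the inputs on which Python A loops forever (never returns):
-- when the first climb does not reach n and each cycle makes no net progress (u ≤ d).
def Pre_clampUp (n : Int) (u : Int) (d : Int) : Prop := n ≤ u ∨ d < u
instance (n : Int) (u : Int) (d : Int) : Decidable (Pre_clampUp n u d) := by unfold Pre_clampUp; infer_instance
def pvWitness_clampUp : Int × Int × Int := (10, 3, 1)

def Spec_clampUp (n : Int) (u : Int) (d : Int) (out : Int) : Prop := out = clampUp_alt n u d
instance (n : Int) (u : Int) (d : Int) (out : Int) : Decidable (Spec_clampUp n u d out) := by unfold Spec_clampUp; infer_instance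

-- ===== CLAIM (what is proved, stated in full; the proofs are below) =====
def Claim_equal_clampUp : Prop := ∀ (n : Int) (u : Int) (d : Int), Dom_clampUp n u d → Pre_clampUp n u d → Spec_clampUp n u d (clampUp n u d)

-- ===== LEMMAS AND PROOFS =====

-- Characterisation of A's loop when each cycle makes progress (d < u):
-- it returns time + 2*max 0 (ceil((n - dist - u)/(u - d))) + 1.
theorem clampUpLoop_eq (n u d : Int) (hud : d < u) :
    ∀ (dist time : Int),
      clampUpLoop n u d dist time
        = time + 2 * max 0 (-(PySem.Int.floordiv (-(n - dist - u)) (u - d))) + 1 := by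
  intro dist time
  induction dist, time using clampUpLoop.induct n u d with
  | case1 dist time h =>
    rw [clampUpLoop]
    simp only [h, if_pos]
    have : -(PySem.Int.floordiv (-(n - dist - u)) (u - d)) ≤ 0 := by
      have hnn : 0 ≤ -(n - dist - u) := by omega
      have := PySem.Int.floordiv_eq_ediv_of_pos (a := -(n - dist - u)) (b := u - d) (by omega)
      rw [this]
      have := Int.ediv_nonneg hnn (by omega : (0:Int) ≤ u - d)
      omega
    omega
  | case2 dist time h h2 => omega
  | case3 dist time h h2 ih =>
    rw [clampUpLoop, if_neg h, dif_neg h2, ih]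
    -- ceil step: ceil(x/(u-d)) = 1 + ceil((x-(u-d))/(u-d)) for x = n - dist - u ≥ 1
    have hx : 1 ≤ n - dist - u := by omega
    have hceil :
        -(PySem.Int.floordiv (-(n - dist - u)) (u - d))
          = 1 + -(PySem.Int.floordiv (-(n - (dist + u - d) - u)) (u - d)) := by
      have e1 := PySem.Int.floordiv_eq_ediv_of_pos (a := -(n - dist - u)) (b := u - d) (by omega)
      have e2 := PySem.Int.floordiv_eq_ediv_of_pos (a := -(n - (dist + u - d) - u)) (b := u - d) (by omega)
      rw [e1, e2]
      have : -(n - dist - u) = -(n - (dist + u - d) - u) + (-1) * (u - d) := by ring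
      rw [this, Int.add_mul_ediv_right _ _ (by omega : u - d ≠ 0)]
      ring
    have hpos : 1 ≤ -(PySem.Int.floordiv (-(n - dist - u)) (u - d)) := by
      have e1 := PySem.Int.floordiv_eq_ediv_of_pos (a := -(n - dist - u)) (b := u - d) (by omega)
      rw [e1]
      have : -(n - dist - u) / (u - d) < 0 := by
        rw [Int.ediv_lt_iff_lt_mul (by omega : (0:Int) < u - d)]
        omega
      omega
    have hnext : 0 ≤ -(PySem.Int.floordiv (-(n - (dist + u - d) - u)) (u - d)) := by omega
    rw [max_eq_right hnext, max_eq_right (by omega : (0:Int) ≤ -(PySem.Int.floordiv (-(n - dist - u)) (u - d)))]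
    omega

-- ===== VERDICT (by name: the statement is the Claim_ definition above) =====
theorem clampUp_spec : Claim_equal_clampUp := by
  intro n u d _ hpre
  unfold Spec_clampUp clampUp clampUp_alt
  by_cases hnu : n ≤ u
  · rw [clampUpLoop]
    simp [hnu]
  · have hud : d < u := by rcases hpre with h | h <;> omega
    rw [clampUpLoop_eq n u d hud 0 0]
    have hpos : 1 ≤ -(PySem.Int.floordiv (-(n - 0 - u)) (u - d)) := by
      have e1 := PySem.Int.floordiv_eq_ediv_of_pos (a := -(n - 0 - u)) (b := u - d) (by omega)
      rw [e1]
      have : -(n - 0 - u) / (u - d) < 0 := by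
        rw [Int.ediv_lt_iff_lt_mul (by omega : (0:Int) < u - d)]
        omega
      omega
    have : (u - n) = -(n - 0 - u) := by ring
    rw [if_neg hnu, this, max_eq_right (by omega : (0:Int) ≤ -(PySem.Int.floordiv (-(n - 0 - u)) (u - d)))]
    omega
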